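-- pv_equiv track=rewrite | github.com/KimNgan0703/Baocao_8quanxe | 8quanxe.py | is_belief_consistent
-- ===== SOURCE A (Python) =====
-- def is_belief_consistent(belief):
--     rows = set()
--     cols = set()
--     for r, c in belief:
--         if r in rows or c in cols:
--             return False
--         rows.add(r)
--         cols.add(c)
--     return True
-- ===== SOURCE B (Python) =====
-- def is_belief_consistent(belief):
--     rows = sorted(r for r, _ in belief)
--     cols = sorted(c for _, c in belief)
--     return all(x != y for x, y in zip(rows, rows[1:])) and \
--            all(x != y for x, y in zip(cols, cols[1:]))
-- ===== Notes on version B (the rewrite author's own statement) =====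
-- stated objective: alternative
-- what changed: Replaces A's incremental hash-set membership loop with early exit by sorting the row and column projections and declaring consistency iff no two adjacent sorted values are equal.
import Mathlib
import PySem

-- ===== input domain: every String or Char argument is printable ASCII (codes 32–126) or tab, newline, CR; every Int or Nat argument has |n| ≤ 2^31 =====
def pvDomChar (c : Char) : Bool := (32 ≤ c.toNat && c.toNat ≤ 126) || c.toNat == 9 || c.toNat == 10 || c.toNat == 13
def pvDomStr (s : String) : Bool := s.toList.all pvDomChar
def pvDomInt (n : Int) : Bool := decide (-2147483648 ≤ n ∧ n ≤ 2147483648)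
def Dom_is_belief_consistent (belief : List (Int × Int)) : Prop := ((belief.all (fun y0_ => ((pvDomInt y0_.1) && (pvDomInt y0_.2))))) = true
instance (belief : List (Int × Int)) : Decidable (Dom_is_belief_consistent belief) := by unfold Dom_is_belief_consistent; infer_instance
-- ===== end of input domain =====

-- B replaces A's incremental hash-set loop with early exit by sorting the row and
-- column projections and checking that no two adjacent sorted values are equal
-- (objective: alternative algorithm).

-- ===== PORT A =====
-- the for-loop of A with its two growing sets and early 'return False'
def isBeliefLoop (rows cols : PySem.Set Int) : List (Int × Int) → Bool
  | [] => true
  | (r, c) :: rest =>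
    if PySem.Set.contains rows r || PySem.Set.contains cols c then false
    else isBeliefLoop (PySem.Set.add rows r) (PySem.Set.add cols c) rest

def is_belief_consistent (belief : List (Int × Int)) : Bool :=
  isBeliefLoop PySem.Set.empty PySem.Set.empty belief

-- ===== PORT B =====
-- all(x != y for x, y in zip(l, l[1:]))
def pvAdjacentDistinct (l : List Int) : Bool :=
  (l.zip l.tail).all (fun p => p.1 != p.2)

def is_belief_consistent_alt (belief : List (Int × Int)) : Bool :=
  let rows := PySem.List.sorted (belief.map (fun p => p.1)) (fun x => x) false
  let cols := PySem.List.sorted (belief.map (fun p => p.2)) (fun x => x) false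
  pvAdjacentDistinct rows && pvAdjacentDistinct cols

-- ===== PRECONDITION & SPEC =====
def Spec_is_belief_consistent (belief : List (Int × Int)) (out : Bool) : Prop := out = is_belief_consistent_alt belief
instance (belief : List (Int × Int)) (out : Bool) : Decidable (Spec_is_belief_consistent belief out) := by unfold Spec_is_belief_consistent; infer_instance

-- ===== CLAIM (what is proved, stated in full; the proofs are below) =====
def Claim_equal_is_belief_consistent : Prop := ∀ (belief : List (Int × Int)), Dom_is_belief_consistent belief → Spec_is_belief_consistent belief (is_belief_consistent belief)

-- ===== LEMMAS AND PROOFS =====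

-- A's loop decides: projections are duplicate-free relative to the accumulated sets
theorem loop_char (bs : List (Int × Int)) (rows cols : PySem.Set Int) :
    isBeliefLoop rows cols bs =
      decide (((bs.map (fun p => p.1)).Nodup ∧ ∀ x ∈ bs.map (fun p => p.1), x ∉ rows) ∧
              ((bs.map (fun p => p.2)).Nodup ∧ ∀ x ∈ bs.map (fun p => p.2), x ∉ cols)) := by
  induction bs generalizing rows cols with
  | nil => simp [isBeliefLoop]
  | cons p bs ih =>
    obtain ⟨r, c⟩ := p
    by_cases hr : r ∈ rows
    · have hrt : PySem.Set.contains rows r = true := (PySem.Set.contains_iff _ _).mpr hr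
      simp only [isBeliefLoop, hrt, Bool.true_or, if_true]
      symm
      simp only [decide_eq_false_iff_not]
      rintro ⟨⟨-, hall⟩, -⟩
      exact hall r (by simp) hr
    · by_cases hc : c ∈ cols
      · have hct : PySem.Set.contains cols c = true := (PySem.Set.contains_iff _ _).mpr hc
        have hrf : PySem.Set.contains rows r = false := by
          simp only [Bool.eq_false_iff]
          intro hcon
          exact hr ((PySem.Set.contains_iff _ _).mp hcon)
        simp only [isBeliefLoop, hct, hrf, Bool.false_or, if_true]
        symm
        simp only [decide_eq_false_iff_not]
        rintro ⟨-, ⟨-, hall⟩⟩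
        exact hall c (by simp) hc
      · have hrf : PySem.Set.contains rows r = false := by
          simp only [Bool.eq_false_iff]
          intro hcon
          exact hr ((PySem.Set.contains_iff _ _).mp hcon)
        have hcf : PySem.Set.contains cols c = false := by
          simp only [Bool.eq_false_iff]
          intro hcon
          exact hc ((PySem.Set.contains_iff _ _).mp hcon)
        simp only [isBeliefLoop, hrf, hcf, Bool.false_or, Bool.false_eq_true, if_false]
        rw [ih, decide_eq_decide]
        simp only [List.map_cons, List.nodup_cons, List.mem_cons, PySem.Set.mem_add,
          forall_eq_or_imp, not_or]
        constructor
        · rintro ⟨⟨hnd1, hall1⟩, hnd2, hall2⟩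
          refine ⟨⟨⟨fun hm => (hall1 r hm).2 rfl, hnd1⟩, ⟨hr, fun y hy => (hall1 y hy).1⟩⟩,
                  ⟨⟨fun hm => (hall2 c hm).2 rfl, hnd2⟩, ⟨hc, fun y hy => (hall2 y hy).1⟩⟩⟩
        · rintro ⟨⟨⟨hr1, hnd1⟩, -, hall1⟩, ⟨⟨hc1, hnd2⟩, -, hall2⟩⟩
          refine ⟨⟨hnd1, fun y hy => ⟨hall1 y hy, fun he => hr1 (he ▸ hy)⟩⟩,
                  ⟨hnd2, fun y hy => ⟨hall2 y hy, fun he => hc1 (he ▸ hy)⟩⟩⟩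

-- on a ≤-sorted list, the adjacent-distinct scan decides Nodup
theorem adjacentDistinct_eq_nodup_of_sorted {l : List Int}
    (hs : l.Pairwise (fun a b => a ≤ b)) :
    pvAdjacentDistinct l = decide l.Nodup := by
  induction l with
  | nil => simp [pvAdjacentDistinct]
  | cons x l ih =>
    rcases List.pairwise_cons.mp hs with ⟨hx, hl⟩
    cases l with
    | nil => simp [pvAdjacentDistinct]
    | cons y t =>
      rcases List.pairwise_cons.mp hl with ⟨hy, -⟩
      have hstep : pvAdjacentDistinct (x :: y :: t) = ((x != y) && pvAdjacentDistinct (y :: t)) := by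
        simp [pvAdjacentDistinct]
      rw [hstep, ih hl]
      by_cases hxy : x = y
      · subst hxy
        simp
      · have hxylt : x < y := lt_of_le_of_ne (hx y (by simp)) hxy
        have hnin : x ∉ y :: t := by
          intro hmem
          rcases List.mem_cons.mp hmem with rfl | hmt
          · exact hxy rfl
          · exact absurd (lt_of_lt_of_le hxylt (hy x hmt)) (lt_irrefl x)
        simp [bne, hxy, List.nodup_cons, hnin]

-- B's per-projection test decides Nodup of the unsorted projection
theorem alt_side (l : List Int) :
    pvAdjacentDistinct (PySem.List.sorted l (fun x => x) false) = decide l.Nodup := by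
  have hs : (PySem.List.sorted l (fun x => x) false).Pairwise (fun a b => a ≤ b) :=
    PySem.List.sorted_pairwise l (fun x => x)
  rw [adjacentDistinct_eq_nodup_of_sorted hs, decide_eq_decide]
  exact (PySem.List.sorted_perm l (fun x => x) false).nodup_iff

-- ===== VERDICT (by name: the statement is the Claim_ definition above) =====
theorem is_belief_consistent_spec : Claim_equal_is_belief_consistent := by
  intro belief _
  have halt : is_belief_consistent_alt belief =
      (pvAdjacentDistinct (PySem.List.sorted (belief.map (fun p => p.1)) (fun x => x) false) &&
       pvAdjacentDistinct (PySem.List.sorted (belief.map (fun p => p.2)) (fun x => x) false)) := rfl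
  unfold Spec_is_belief_consistent is_belief_consistent
  rw [loop_char, halt, alt_side, alt_side]
  simp [PySem.Set.empty]
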